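-- pv_equiv track=rewrite | github.com/SofiaMM/Bioinf-Project | projeto.py | list_phrases
-- ===== SOURCE A (Python) =====
-- def list_phrases(list_lines):    #chave é o numero da linha, valor é uma lista com todas as palavras da frase
--     dic_lines={}
--     ind = 1
--     for i in range(len(list_lines)):
--         if list_lines[i] != '\n':
--             if ind not in dic_lines:
--                 dic_lines[ind]=[list_lines[i]]
--             else:
--                 dic_lines[ind].append(list_lines[i])
--         else:
--             ind += 1
--     return dic_lines
-- ===== SOURCE B (Python) =====
-- def list_phrases(list_lines):
--     return _phrases_from(list_lines, 1)
--
-- def _phrases_from(lines, key):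
--     # Recursive: split at the FIRST newline, take the whole head segment at
--     # once, and recurse on the remainder with the next key.  Keys are
--     # distinct (rest's keys are all > key), so dict merge keeps order.
--     if '\n' not in lines:
--         return {key: lines} if lines else {}
--     j = lines.index('\n')
--     head = lines[:j]
--     rest = _phrases_from(lines[j + 1:], key + 1)
--     return {key: head, **rest} if head else rest
-- ===== Notes on version B (the rewrite author's own statement) =====
-- stated objective: alternative
-- what changed: A is one iterative word-at-a-time loop threading a counter and mutating the dict via membership tests; B is a recursive segment-at-a-time algorithm that locates the first newline with index, slices out the whole head segment, recurses on the remainder with the next key, and merges the dicts.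
import Mathlib
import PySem

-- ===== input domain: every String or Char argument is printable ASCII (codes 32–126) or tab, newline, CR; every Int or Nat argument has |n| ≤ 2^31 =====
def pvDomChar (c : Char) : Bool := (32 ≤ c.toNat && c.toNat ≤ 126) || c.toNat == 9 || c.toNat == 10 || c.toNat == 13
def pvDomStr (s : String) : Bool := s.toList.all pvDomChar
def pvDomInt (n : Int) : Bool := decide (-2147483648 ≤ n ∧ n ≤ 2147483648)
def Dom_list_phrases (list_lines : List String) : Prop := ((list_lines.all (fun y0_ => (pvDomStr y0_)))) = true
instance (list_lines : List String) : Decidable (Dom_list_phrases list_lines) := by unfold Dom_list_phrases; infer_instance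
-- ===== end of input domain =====

-- B replaces A's iterative counter-threaded word-at-a-time dict loop by a recursive
-- segment-at-a-time algorithm (find first '\n', slice off the head segment, recurse);
-- objective: alternative decomposition, same cost.

-- ===== PORT A =====
-- the Python dict (Int keys, insertion order) as an association list, per the type convention
def pvContains (d : List (Int × List String)) (k : Int) : Bool := d.any (fun p => p.1 == k)
def pvAppendAt (d : List (Int × List String)) (k : Int) (w : String) : List (Int × List String) :=
  d.map (fun p => if p.1 == k then (p.1, p.2 ++ [w]) else p)

-- the body of A's for-loop, on the state (dic_lines, ind)
def pvStepA (st : List (Int × List String) × Int) (w : String) : List (Int × List String) × Int :=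
  if w ≠ "\n" then
    if pvContains st.1 st.2 = false then (st.1 ++ [(st.2, [w])], st.2)
    else (pvAppendAt st.1 st.2 w, st.2)
  else (st.1, st.2 + 1)

def list_phrases (list_lines : List String) : List (Int × List String) :=
  ((PySem.List.pyRange 0 (PySem.List.len list_lines)).foldl
    (fun st i => pvStepA st (PySem.List.pyGetD list_lines i "")) ([], 1)).1

-- ===== PORT B =====
-- '\n' in lines → List.contains / membership; lines.index('\n') (guarded by membership,
-- so it cannot raise) → List.idxOf; lines[:j] / lines[j+1:] with 0 ≤ j < len → take/drop;
-- {key: head, **rest} with key distinct from rest's keys → cons (insertion order kept).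
def phrasesFrom (lines : List String) (key : Int) : List (Int × List String) :=
  if h : "\n" ∈ lines then
    let j := lines.idxOf "\n"
    let head := lines.take j
    let rest := phrasesFrom (lines.drop (j + 1)) (key + 1)
    if head ≠ [] then (key, head) :: rest else rest
  else
    if lines ≠ [] then [(key, lines)] else []
termination_by lines.length
decreasing_by
  have hpos : 0 < lines.length := List.length_pos_of_mem h
  simp [List.length_drop]; omega

def list_phrases_alt (list_lines : List String) : List (Int × List String) :=
  phrasesFrom list_lines 1

-- ===== PRECONDITION & SPEC =====
def Spec_list_phrases (list_lines : List String) (out : List (Int × List String)) : Prop := out = list_phrases_alt list_lines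
instance (list_lines : List String) (out : List (Int × List String)) : Decidable (Spec_list_phrases list_lines out) := by unfold Spec_list_phrases; infer_instance

-- ===== CLAIM =====
def Claim_equal_list_phrases : Prop := ∀ (list_lines : List String), Dom_list_phrases list_lines → Spec_list_phrases list_lines (list_phrases list_lines)

-- ===== LEMMAS AND PROOFS =====

-- the optional singleton dict for the currently-open segment
def pvSeg (ind : Int) (acc : List String) : List (Int × List String) :=
  if acc ≠ [] then [(ind, acc)] else []

lemma pvSeg_keys (ind : Int) (acc : List String) (p : Int × List String)
    (hp : p ∈ pvSeg ind acc) : p.1 = ind := by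
  unfold pvSeg at hp
  by_cases h : acc = [] <;> simp [h] at hp
  · rw [hp]

-- a word w ≠ '\n': A appends it to the open segment's dict entry
lemma pvStep_word (d : List (Int × List String)) (ind : Int) (acc : List String)
    (hd : ∀ p ∈ d, p.1 < ind) (w : String) (hw : w ≠ "\n") :
    pvStepA (d ++ pvSeg ind acc, ind) w = (d ++ pvSeg ind (acc ++ [w]), ind) := by
  unfold pvStepA
  rw [if_pos hw]
  by_cases hacc : acc = []
  · subst hacc
    have hc : pvContains (d ++ pvSeg ind [], ind).1 (d ++ pvSeg ind [], ind).2 = false := by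
      simp only [pvSeg, pvContains, ne_eq, not_true_eq_false, if_false, List.append_nil]
      simp only [List.any_eq_false]
      intro p hp
      have := hd p hp
      simp; omega
    rw [if_pos hc]
    simp [pvSeg]
  · have hc : pvContains (d ++ pvSeg ind acc, ind).1 (d ++ pvSeg ind acc, ind).2 = true := by
      simp [pvContains, pvSeg, hacc]
    rw [if_neg (by simp [hc])]
    simp only [pvAppendAt, List.map_append]
    have h1 : d.map (fun p => if p.1 == ind then (p.1, p.2 ++ [w]) else p) = d := by
      conv_rhs => rw [← List.map_id d]
      apply List.map_congr_left
      intro p hp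
      have := hd p hp
      simp; omega
    have h2 : (pvSeg ind acc).map (fun p => if p.1 == ind then (p.1, p.2 ++ [w]) else p)
        = pvSeg ind (acc ++ [w]) := by
      simp [pvSeg, hacc]
    rw [h1, h2]

-- folding a newline-free list just extends the open segment
lemma pvFold_noNl (seg : List String) (d : List (Int × List String)) (acc : List String)
    (ind : Int) (hseg : "\n" ∉ seg) (hd : ∀ p ∈ d, p.1 < ind) :
    seg.foldl pvStepA (d ++ pvSeg ind acc, ind) = (d ++ pvSeg ind (acc ++ seg), ind) := by
  induction seg generalizing acc with
  | nil => simp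
  | cons w ws ih =>
    have hw : w ≠ "\n" := by intro h; exact hseg (h ▸ List.mem_cons_self)
    have hws : "\n" ∉ ws := fun h => hseg (List.mem_cons_of_mem _ h)
    simp only [List.foldl_cons]
    rw [pvStep_word d ind acc hd w hw, ih (acc ++ [w]) hws]
    simp

lemma pvNotMem_take_idxOf (l : List String) (a : String) : a ∉ l.take (l.idxOf a) := by
  induction l with
  | nil => simp
  | cons b bs ih =>
    by_cases h : b = a
    · subst h; simp
    · rw [List.idxOf_cons_ne _ (by simpa using h)]
      simp only [List.take_succ_cons, List.mem_cons]
      rintro (rfl | hmem)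
      · exact h rfl
      · exact ih hmem

lemma pvSplit_at_idxOf (l : List String) (a : String) (h : a ∈ l) :
    l = l.take (l.idxOf a) ++ a :: l.drop (l.idxOf a + 1) := by
  have hlt : l.idxOf a < l.length := List.idxOf_lt_length_of_mem h
  have hget : l[l.idxOf a] = a := List.getElem_idxOf hlt
  conv_lhs => rw [← List.take_append_drop (l.idxOf a) l]
  rw [List.drop_eq_getElem_cons hlt, hget]

-- main invariant: A's fold from (d, ind) equals d ++ phrasesFrom lines ind
lemma pvMain (n : ℕ) : ∀ (lines : List String), lines.length ≤ n →
    ∀ (d : List (Int × List String)) (ind : Int), (∀ p ∈ d, p.1 < ind) →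
    (lines.foldl pvStepA (d, ind)).1 = d ++ phrasesFrom lines ind := by
  induction n with
  | zero =>
    intro lines hlen d ind hd
    have : lines = [] := List.eq_nil_of_length_eq_zero (Nat.le_zero.mp hlen)
    subst this
    simp [phrasesFrom]
  | succ m ih =>
    intro lines hlen d ind hd
    by_cases h : "\n" ∈ lines
    · set j := lines.idxOf "\n" with hj
      have hsplit := pvSplit_at_idxOf lines "\n" h
      have hnn : "\n" ∉ lines.take j := pvNotMem_take_idxOf lines "\n"
      have hlt : j < lines.length := List.idxOf_lt_length_of_mem h
      have hfold : (lines.foldl pvStepA (d, ind)).1 =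
          ((lines.drop (j + 1)).foldl pvStepA
            (d ++ pvSeg ind (lines.take j), ind + 1)).1 := by
        conv_lhs => rw [hsplit]
        rw [List.foldl_append, List.foldl_cons]
        have hstart : (d, ind) = (d ++ pvSeg ind [], ind) := by simp [pvSeg]
        rw [hstart, pvFold_noNl (lines.take j) d [] ind hnn hd]
        simp only [List.nil_append]
        have hnl : pvStepA (d ++ pvSeg ind (lines.take j), ind) "\n"
            = (d ++ pvSeg ind (lines.take j), ind + 1) := by
          simp [pvStepA]
        rw [hnl]
      rw [hfold]
      have hd' : ∀ p ∈ d ++ pvSeg ind (lines.take j), p.1 < ind + 1 := by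
        intro p hp
        rcases List.mem_append.mp hp with hp | hp
        · have := hd p hp; omega
        · rw [pvSeg_keys ind _ p hp]; omega
      have hlen' : (lines.drop (j + 1)).length ≤ m := by
        simp only [List.length_drop]; omega
      rw [ih (lines.drop (j + 1)) hlen' _ (ind + 1) hd']
      conv_rhs => rw [phrasesFrom]
      rw [dif_pos h]
      by_cases he : lines.take j = []
      · simp [he, pvSeg, ← hj]
      · simp [he, pvSeg, ← hj]
    · have hnl : "\n" ∉ lines := h
      have : (lines.foldl pvStepA (d, ind)).1 = (d ++ pvSeg ind lines, ind).1 := by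
        have hstart : (d, ind) = (d ++ pvSeg ind [], ind) := by simp [pvSeg]
        rw [hstart, pvFold_noNl lines d [] ind hnl hd]
        simp
      rw [this]
      conv_rhs => rw [phrasesFrom]
      rw [dif_neg h]
      by_cases he : lines = [] <;> simp [he, pvSeg]

-- ===== VERDICT =====
theorem list_phrases_spec : Claim_equal_list_phrases := by
  intro l _
  unfold Spec_list_phrases list_phrases list_phrases_alt
  rw [PySem.List.foldl_pyRange_pyGetD l "" pvStepA _ (le_refl 0)]
  simpa using pvMain l.length l (le_refl _) [] 1 (by simp)
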